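-- pv_equiv track=rewrite | github.com/pranavvyawahare25/Python_Docs_Rag_System | src/utils.py | detect_section_header
-- ===== SOURCE A (Python) =====
-- from typing import List, Tuple
--
-- def detect_section_header(line: str) -> Tuple[bool, int]:
--     """Detect if a line is a section header and determine its level.
--
--     Python docs use underlines with special characters to mark sections:
--     - '***' for main titles
--     - '===' for level 1 headers
--     - '---' for level 2 headers
--
--     Args:
--         line: Line to check
--
--     Returns:
--         Tuple of (is_header, level) where level is 0 if not a header
--     """
--     stripped = line.strip()
--
--     # Check for underline-style headers
--     if len(stripped) >= 3:
--         if all(c == '*' for c in stripped):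
--             return True, 1
--         elif all(c == '=' for c in stripped):
--             return True, 2
--         elif all(c == '-' for c in stripped):
--             return True, 3
--
--     return False, 0
-- ===== SOURCE B (Python) =====
-- _HEADER_LEVELS = {'*': 1, '=': 2, '-': 3}
--
-- def detect_section_header(line: str):
--     """Detect underline-style section headers via one distinct-character set
--     build plus a single table lookup (instead of three full scans)."""
--     stripped = line.strip()
--     chars = set(stripped)
--     if len(stripped) >= 3 and len(chars) == 1:
--         level = _HEADER_LEVELS.get(next(iter(chars)))
--         if level is not None:
--             return True, level
--     return False, 0
-- ===== Notes on version B (the rewrite author's own statement) =====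
-- stated objective: simpler
-- what changed: A's three sequential all()-scans over the stripped line are replaced by building the set of distinct characters once and looking the single character up in a {'*':1,'=':2,'-':3} table.
import Mathlib
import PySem

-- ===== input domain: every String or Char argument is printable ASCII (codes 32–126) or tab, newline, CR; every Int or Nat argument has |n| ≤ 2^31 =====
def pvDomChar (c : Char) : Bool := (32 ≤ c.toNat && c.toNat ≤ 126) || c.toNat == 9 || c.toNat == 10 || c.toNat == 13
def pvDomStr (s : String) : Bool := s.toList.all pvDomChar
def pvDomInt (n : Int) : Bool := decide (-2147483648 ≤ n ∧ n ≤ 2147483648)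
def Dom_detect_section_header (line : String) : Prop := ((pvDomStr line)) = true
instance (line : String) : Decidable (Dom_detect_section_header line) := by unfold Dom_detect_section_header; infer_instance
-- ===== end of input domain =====

-- B replaces A's three sequential all()-scans by one distinct-character set build plus a single table lookup (simpler).


-- ===== PORT A =====
def detect_section_header (line : String) : Bool × Int :=
  let stripped := PySem.Str.strip line
  if PySem.Str.len stripped ≥ 3 then
    if stripped.toList.all (fun c => c == '*') then (true, 1)
    else if stripped.toList.all (fun c => c == '=') then (true, 2)
    else if stripped.toList.all (fun c => c == '-') then (true, 3)
    else (false, 0)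
  else (false, 0)

-- ===== PORT B =====
def pvHeaderLevels : PySem.Dict Char Int := PySem.Dict.ofList [('*', 1), ('=', 2), ('-', 3)]

def detect_section_header_alt (line : String) : Bool × Int :=
  let stripped := PySem.Str.strip line
  let chars : PySem.Set Char := PySem.Set.ofList stripped.toList
  if PySem.Str.len stripped ≥ 3 ∧ PySem.Set.len chars = 1 then
    -- chars is a singleton here, so next(iter(chars)) is its unique element
    match chars.head? with
    | some c =>
      match pvHeaderLevels.get? c with
      | some lvl => (true, lvl)
      | none => (false, 0)
    | none => (false, 0)
  else (false, 0)

-- ===== PRECONDITION & SPEC =====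
def Spec_detect_section_header (line : String) (out : Bool × Int) : Prop := out = detect_section_header_alt line
instance (line : String) (out : Bool × Int) : Decidable (Spec_detect_section_header line out) := by unfold Spec_detect_section_header; infer_instance

-- ===== CLAIM (what is proved, stated in full; the proofs are below) =====
def Claim_equal_detect_section_header : Prop := ∀ (line : String), Dom_detect_section_header line → Spec_detect_section_header line (detect_section_header line)

-- ===== LEMMAS AND PROOFS =====

theorem pv_items : pvHeaderLevels.items = [('*', 1), ('=', 2), ('-', 3)] := by decide

-- a nonempty all-c list has distinct-character set [c]
theorem pv_ofList_singleton_of_all (l : List Char) (c : Char) (hne : l ≠ [])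
    (hall : l.all (fun x => x == c) = true) : PySem.Set.ofList l = [c] := by
  have hmemc : c ∈ PySem.Set.ofList l := by
    rw [PySem.Set.mem_ofList]
    cases l with
    | nil => exact absurd rfl hne
    | cons a t =>
      have ha : a = c := by
        have := List.all_eq_true.mp hall a List.mem_cons_self
        simpa using this
      exact ha ▸ List.mem_cons_self
  have hsub : ∀ x ∈ PySem.Set.ofList l, x = c := by
    intro x hx
    rw [PySem.Set.mem_ofList] at hx
    have := (List.all_eq_true.mp hall) x hx
    simpa using this
  have hnd : (PySem.Set.ofList l).Nodup := PySem.Set.nodup_ofList l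
  cases hs : PySem.Set.ofList l with
  | nil => rw [hs] at hmemc; simp at hmemc
  | cons a t =>
    rw [hs] at hsub hnd hmemc
    have ha : a = c := hsub a (List.mem_cons_self)
    cases t with
    | nil => simp [ha]
    | cons b t' =>
      have hb : b = c := hsub b (by simp)
      rw [ha, hb] at hnd
      simp at hnd

theorem pv_all_of_ofList_singleton (l : List Char) (c : Char)
    (hs : PySem.Set.ofList l = [c]) : l.all (fun x => x == c) = true := by
  rw [List.all_eq_true]
  intro x hx
  have : x ∈ PySem.Set.ofList l := (PySem.Set.mem_ofList ..).mpr hx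
  rw [hs] at this
  simpa using this

-- core of both ports, as a function of the stripped character list
theorem pv_core (l : List Char) :
    (if (l.length : Int) ≥ 3 then
      if l.all (fun c => c == '*') then ((true : Bool), (1 : Int))
      else if l.all (fun c => c == '=') then (true, 2)
      else if l.all (fun c => c == '-') then (true, 3)
      else (false, 0)
    else (false, 0)) =
    (if (l.length : Int) ≥ 3 ∧ PySem.Set.len (PySem.Set.ofList l) = 1 then
      match (PySem.Set.ofList l).head? with
      | some c =>
        match pvHeaderLevels.get? c with
        | some lvl => (true, lvl)
        | none => ((false : Bool), (0 : Int))
      | none => (false, 0)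
    else (false, 0)) := by
  by_cases hlen : (l.length : Int) ≥ 3
  · have hne : l ≠ [] := by
      intro h; subst h; simp at hlen
    simp only [hlen, if_true, true_and]
    by_cases h1 : l.all (fun c => c == '*') = true
    · have := pv_ofList_singleton_of_all l '*' hne h1
      simp [h1, this, PySem.Set.len, PySem.Dict.get?, pv_items]
    · by_cases h2 : l.all (fun c => c == '=') = true
      · have := pv_ofList_singleton_of_all l '=' hne h2
        simp [h1, h2, this, PySem.Set.len, PySem.Dict.get?, pv_items]
      · by_cases h3 : l.all (fun c => c == '-') = true
        · have := pv_ofList_singleton_of_all l '-' hne h3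
          simp [h1, h2, h3, this, PySem.Set.len, PySem.Dict.get?, pv_items]
        · -- A falls through; B: either the set is not a singleton, or its char is not in the table
          simp only [h1, h2, h3, if_false, Bool.false_eq_true]
          by_cases hs : PySem.Set.len (PySem.Set.ofList l) = 1
          · have hsing : ∃ c, PySem.Set.ofList l = [c] := by
              cases hl : PySem.Set.ofList l with
              | nil => rw [hl] at hs; simp [PySem.Set.len] at hs
              | cons a t =>
                cases t with
                | nil => exact ⟨a, rfl⟩
                | cons b t' => rw [hl] at hs; simp [PySem.Set.len] at hs; omega
            obtain ⟨c, hc⟩ := hsing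
            have hall := pv_all_of_ofList_singleton l c hc
            have hc1 : c ≠ '*' := by rintro rfl; exact h1 hall
            have hc2 : c ≠ '=' := by rintro rfl; exact h2 hall
            have hc3 : c ≠ '-' := by rintro rfl; exact h3 hall
            have e1 : ('*' == c) = false := beq_eq_false_iff_ne.mpr (Ne.symm hc1)
            have e2 : ('=' == c) = false := beq_eq_false_iff_ne.mpr (Ne.symm hc2)
            have e3 : ('-' == c) = false := beq_eq_false_iff_ne.mpr (Ne.symm hc3)
            simp [hc, PySem.Dict.get?, pv_items, List.find?, e1, e2, e3]
          · simp only [PySem.Set.len] at hs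
            simp [hs]
  · simp [hlen]

-- ===== VERDICT (by name: the statement is the Claim_ definition above) =====
theorem detect_section_header_spec : Claim_equal_detect_section_header := by
  intro line _
  unfold Spec_detect_section_header detect_section_header detect_section_header_alt
  have hl : PySem.Str.len (PySem.Str.strip line) = ((PySem.Str.strip line).toList.length : Int) := by
    simp [PySem.Str.len_eq]
  simp only [hl]
  exact pv_core (PySem.Str.strip line).toList
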